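-- pv_equiv track=rewrite | github.com/hippieperm/Coding-Test | 프로그래머스/1/12948. 핸드폰 번호 가리기/핸드폰 번호 가리기.py | solution
-- ===== SOURCE A (Python) =====
-- def solution(phoneNumber):
--     answer = ''
--     for i in range(len(phoneNumber)):
--         if i < len(phoneNumber) - 4:
--             answer += '*'
--         else:
--             answer += phoneNumber[i]
--     return answer
-- ===== SOURCE B (Python) =====
-- def solution(phoneNumber):
--     return '*' * (len(phoneNumber) - 4) + phoneNumber[-4:]
-- ===== Notes on version B (the rewrite author's own statement) =====
-- stated objective: simpler
-- what changed: Replaced the per-character index loop and branch by a single closed-form expression: a repeated-asterisk prefix of length len-4 concatenated with the last-4-character slice (Python's negative repeat count and clamping slice handle short inputs).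
import Mathlib
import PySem

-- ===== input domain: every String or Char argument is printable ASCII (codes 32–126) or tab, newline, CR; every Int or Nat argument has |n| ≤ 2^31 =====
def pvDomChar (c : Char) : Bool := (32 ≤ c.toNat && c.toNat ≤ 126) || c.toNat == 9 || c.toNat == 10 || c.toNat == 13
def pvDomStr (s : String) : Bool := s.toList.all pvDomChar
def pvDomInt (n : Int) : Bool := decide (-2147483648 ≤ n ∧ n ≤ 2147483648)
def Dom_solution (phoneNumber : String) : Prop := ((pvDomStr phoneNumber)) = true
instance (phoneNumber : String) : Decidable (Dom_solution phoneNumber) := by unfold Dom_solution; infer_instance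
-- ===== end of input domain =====

-- B replaces A's per-character loop with a closed-form '*'-prefix plus last-4 slice (simpler).


-- ===== PORT A =====
def solution (phoneNumber : String) : String :=
  String.ofList <|
    (PySem.List.pyRange 0 (PySem.Str.len phoneNumber) 1).foldl
      (fun answer i =>
        if i < PySem.Str.len phoneNumber - 4 then answer ++ ['*']
        else answer ++ [PySem.List.pyGetD phoneNumber.toList i ' '])
      []

-- ===== PORT B =====
def solution_alt (phoneNumber : String) : String :=
  String.ofList
    (PySem.List.pyRepeat ['*'] (PySem.Str.len phoneNumber - 4)
      ++ PySem.List.slice phoneNumber.toList (some (-4)) none)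

-- ===== PRECONDITION & SPEC =====
def Spec_solution (phoneNumber : String) (out : String) : Prop := out = solution_alt phoneNumber
instance (phoneNumber : String) (out : String) : Decidable (Spec_solution phoneNumber out) := by unfold Spec_solution; infer_instance

-- ===== CLAIM (what is proved, stated in full; the proofs are below) =====
def Claim_equal_solution : Prop := ∀ (phoneNumber : String), Dom_solution phoneNumber → Spec_solution phoneNumber (solution phoneNumber)

-- ===== LEMMAS AND PROOFS =====

-- masking by index over range(n) equals a replicate prefix plus the dropped tail
theorem mask_range_eq (l : List Char) (m : Nat) (hm : m ≤ l.length) :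
    (List.range l.length).map (fun k => if k < m then '*' else l.getD k ' ')
      = List.replicate m '*' ++ l.drop m := by
  apply List.ext_getElem
  · simp [Nat.add_sub_cancel' hm]
  · intro i h1 h2
    simp only [List.getElem_map, List.getElem_range]
    by_cases hi : i < m
    · rw [if_pos hi, List.getElem_append_left (by simpa using hi), List.getElem_replicate]
    · rw [if_neg hi]
      rw [List.getElem_append_right (by simpa using hi)]
      simp only [List.length_replicate, List.getElem_drop]
      rw [List.getD_eq_getElem l ' ' (by simpa using h1)]
      congr 1
      omega

theorem solution_eq_alt (s : String) : solution s = solution_alt s := by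
  unfold solution solution_alt
  have hb : (fun (answer : List Char) (i : Int) =>
        if i < PySem.Str.len s - 4 then answer ++ ['*']
        else answer ++ [PySem.List.pyGetD s.toList i ' '])
      = fun answer i => answer ++
          [if i < PySem.Str.len s - 4 then '*' else PySem.List.pyGetD s.toList i ' '] := by
    funext a i; split_ifs <;> rfl
  rw [hb, PySem.List.foldl_append_singleton_eq_map]
  simp only [PySem.Str.len_eq, PySem.List.pyRange_zero_natCast, List.map_map]
  rw [PySem.List.slice_from_neg_ofNat s.toList 4 (by omega)]
  have hrep : PySem.List.pyRepeat ['*'] ((s.toList.length : Int) - 4)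
      = List.replicate (s.toList.length - 4) '*' := by
    rw [PySem.List.pyRepeat_singleton]
    congr 1
    omega
  rw [hrep]
  congr 1
  have : ∀ k : Nat, ((fun k : Nat => if (k : Int) < (s.toList.length : Int) - 4
        then '*' else PySem.List.pyGetD s.toList (k : Int) ' ') k)
      = (fun k : Nat => if k < s.toList.length - 4 then '*' else s.toList.getD k ' ') k := by
    intro k
    simp only [PySem.List.pyGetD_natCast]
    congr 1
    simp only [eq_iff_iff]
    omega
  calc (List.range s.toList.length).map _
      = (List.range s.toList.length).map
          (fun k : Nat => if k < s.toList.length - 4 then '*' else s.toList.getD k ' ') :=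
        List.map_congr_left (fun k _ => this k)
    _ = _ := mask_range_eq s.toList (s.toList.length - 4) (by omega)

-- ===== VERDICT (by name: the statement is the Claim_ definition above) =====
theorem solution_spec : Claim_equal_solution := by
  intro s _
  exact solution_eq_alt s
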